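-- pv_equiv track=rewrite | github.com/mbimunyui87/data_structure | ranking.py | rank_dict_items
-- ===== SOURCE A (Python) =====
-- def rank_dict_items(input_dict):
--     sorted_dict = dict(sorted(input_dict.items(), key=lambda item: item[1], reverse=True))
--
--     rank_dict = {}
--     rank = 1
--
--     for i, (key, value) in enumerate(sorted_dict.items()):
--         if i > 0 and value == prev_value:
--             rank_dict[key] = prev_rank
--         else:
--             rank_dict[key] = rank
--             prev_rank = rank
--         prev_value = value
--         rank += 1
--
--     return rank_dict, sorted_dict
-- ===== SOURCE B (Python) =====
-- def rank_dict_items(input_dict):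
--     sorted_dict = dict(sorted(input_dict.items(), key=lambda item: item[1], reverse=True))
--     values = list(sorted_dict.values())
--     rank_dict = {key: 1 + sum(1 for w in values if w > value)
--                  for key, value in sorted_dict.items()}
--     return rank_dict, sorted_dict
-- ===== Notes on version B (the rewrite author's own statement) =====
-- stated objective: simpler
-- what changed: The stateful prev_value/prev_rank/rank single pass is replaced by a stateless dict comprehension that gives each key rank 1 + (number of strictly greater values); Pre_ only excludes association lists with duplicate keys, which do not encode any Python dict (A's parameter is a dict, so such lists correspond to no actual input).
import Mathlib
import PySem

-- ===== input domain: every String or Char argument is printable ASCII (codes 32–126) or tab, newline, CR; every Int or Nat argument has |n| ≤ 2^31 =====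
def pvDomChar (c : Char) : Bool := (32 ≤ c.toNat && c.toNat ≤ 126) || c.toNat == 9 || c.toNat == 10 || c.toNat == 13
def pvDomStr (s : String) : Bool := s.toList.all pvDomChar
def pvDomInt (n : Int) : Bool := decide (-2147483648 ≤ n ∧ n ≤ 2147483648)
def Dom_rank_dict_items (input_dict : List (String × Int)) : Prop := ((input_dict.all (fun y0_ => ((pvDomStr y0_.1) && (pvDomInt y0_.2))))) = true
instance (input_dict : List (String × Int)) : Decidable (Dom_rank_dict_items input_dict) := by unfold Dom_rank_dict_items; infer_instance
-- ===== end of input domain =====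

-- B replaces A's stateful prev_value/prev_rank ranking pass by a stateless
-- "1 + number of strictly greater values" comprehension (simpler, not faster).


-- ===== PORT A =====
-- loop body of A: state = (rank_dict, rank, prev_value, prev_rank), element = (i, (key, value))
def rankStep (st : (PySem.Dict String Int) × Int × Int × Int) (p : Int × String × Int) :
    (PySem.Dict String Int) × Int × Int × Int :=
  if 0 < p.1 ∧ p.2.2 = st.2.2.1 then
    (st.1.insert p.2.1 st.2.2.2, st.2.1 + 1, p.2.2, st.2.2.2)
  else
    (st.1.insert p.2.1 st.2.1, st.2.1 + 1, p.2.2, st.2.1)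

def rank_dict_items (input_dict : List (String × Int)) : (List (String × Int)) × (List (String × Int)) :=
  let sorted_dict := PySem.Dict.ofList (PySem.List.sorted input_dict (fun item => item.2) true)
  -- prev_value / prev_rank are uninitialized in Python; the 0s below are never read at i = 0
  let final := (PySem.List.enumerate sorted_dict.items 0).foldl rankStep (PySem.Dict.empty, 1, 0, 0)
  (final.1.items, sorted_dict.items)

-- ===== PORT B =====
-- sum(1 for w in values if w > value)
def gtCount (values : List Int) (v : Int) : Int :=
  (values.map (fun w => if v < w then (1 : Int) else 0)).sum

def rank_dict_items_alt (input_dict : List (String × Int)) : (List (String × Int)) × (List (String × Int)) :=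
  let sorted_dict := PySem.Dict.ofList (PySem.List.sorted input_dict (fun item => item.2) true)
  let values := sorted_dict.values
  let rank_dict := sorted_dict.items.foldl
    (fun d kv => d.insert kv.1 (1 + gtCount values kv.2)) PySem.Dict.empty
  (rank_dict.items, sorted_dict.items)

-- ===== PRECONDITION & SPEC =====
-- Pre_ excludes association lists with a repeated key: A's parameter is a Python dict, which
-- cannot hold duplicate keys, so such lists encode no actual input of A.
def Pre_rank_dict_items (input_dict : List (String × Int)) : Prop :=
  (input_dict.map Prod.fst).Nodup
instance (input_dict : List (String × Int)) : Decidable (Pre_rank_dict_items input_dict) := by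
  unfold Pre_rank_dict_items; infer_instance

def pvWitness_rank_dict_items : (List (String × Int)) := [("a", 2), ("b", 1), ("c", 2)]

def Spec_rank_dict_items (input_dict : List (String × Int)) (out : (List (String × Int)) × (List (String × Int))) : Prop := out = rank_dict_items_alt input_dict
instance (input_dict : List (String × Int)) (out : (List (String × Int)) × (List (String × Int))) : Decidable (Spec_rank_dict_items input_dict out) := by unfold Spec_rank_dict_items; infer_instance

-- ===== CLAIM (what is proved, stated in full; the proofs are below) =====
def Claim_equal_rank_dict_items : Prop := ∀ (input_dict : List (String × Int)), Dom_rank_dict_items input_dict → Pre_rank_dict_items input_dict → Spec_rank_dict_items input_dict (rank_dict_items input_dict)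

-- ===== LEMMAS AND PROOFS =====

-- gtCount is a count of the strictly greater values
theorem gtCount_eq_countP (values : List Int) (v : Int) :
    gtCount values v = ((values.countP (fun w => decide (v < w)) : Nat) : Int) := by
  simpa [gtCount] using PySem.List.sum_map_ite_one_zero (fun w => decide (v < w)) values

-- A's loop invariant: after a nonempty processed prefix p, with rank = |p| + 1,
-- prev_value = the (minimal) last processed value and prev_rank = 1 + #greater,
-- the loop fills in exactly B's ranks.
theorem rank_loop_inv (s : List (String × Int))
    (h2 : s.Pairwise (fun a b => b.2 ≤ a.2))
    (h3 : (s.map Prod.fst).Nodup) :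
    ∀ (t p : List (String × Int)) (acc : PySem.Dict String Int) (prevV : Int),
    s = p ++ t →
    acc.items = p.map (fun kv => (kv.1, 1 + gtCount (s.map Prod.snd) kv.2)) →
    (∀ a ∈ p, prevV ≤ a.2) →
    (∀ b ∈ t, b.2 ≤ prevV) →
    p ≠ [] →
    ((PySem.List.enumerate t (p.length : Int)).foldl rankStep
        (acc, (p.length : Int) + 1, prevV, 1 + gtCount (s.map Prod.snd) prevV)).1.items
      = s.map (fun kv => (kv.1, 1 + gtCount (s.map Prod.snd) kv.2)) := by
  intro t
  induction t with
  | nil =>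
    intro p acc prevV h1 h4 h5 h6 h7
    simp only [List.append_nil] at h1
    subst h1
    simpa [PySem.List.enumerate] using h4
  | cons b t' ih =>
    intro p acc prevV h1 h4 h5 h6 h7
    have hvb : b.2 ≤ prevV := h6 b (by simp)
    have ht' : ∀ c ∈ t', c.2 ≤ b.2 := by
      have hbt : (b :: t').Pairwise (fun a b => b.2 ≤ a.2) :=
        (List.pairwise_append.mp (h1 ▸ h2)).2.1
      exact fun c hc => (List.pairwise_cons.mp hbt).1 c hc
    have hcount : b.2 ≠ prevV → gtCount (s.map Prod.snd) b.2 = (p.length : Int) := by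
      intro hne
      rw [gtCount_eq_countP, h1]
      have hlt : b.2 < prevV := lt_of_le_of_ne hvb hne
      rw [List.map_append, List.countP_append]
      have c1 : List.countP (fun w => decide (b.2 < w)) (p.map Prod.snd) = (p.map Prod.snd).length := by
        rw [List.countP_eq_length]
        intro w hw
        rcases List.mem_map.mp hw with ⟨a, ha, rfl⟩
        exact decide_eq_true (lt_of_lt_of_le hlt (h5 a ha))
      have c2 : List.countP (fun w => decide (b.2 < w)) ((b :: t').map Prod.snd) = 0 := by
        rw [List.countP_eq_zero]
        intro w hw
        rcases List.mem_map.mp hw with ⟨a, ha, rfl⟩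
        rcases List.mem_cons.mp ha with rfl | ha'
        · simp
        · simpa using not_lt.mpr (ht' a ha')
      rw [c1, c2]
      simp
    have hkeysP : b.1 ∉ p.map Prod.fst := by
      have := h1 ▸ h3
      rw [List.map_append, List.nodup_append] at this
      exact fun hmem => this.2.2 b.1 hmem b.1 (by simp) rfl
    have hkfresh : acc.contains b.1 = false := by
      rw [PySem.Dict.contains_eq_decide_mem_keys, decide_eq_false_iff_not]
      simp only [PySem.Dict.keys, h4, List.map_map]
      simpa using hkeysP
    have hstep : rankStep (acc, (p.length : Int) + 1, prevV, 1 + gtCount (s.map Prod.snd) prevV)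
          ((p.length : Int), b)
        = (acc.insert b.1 (1 + gtCount (s.map Prod.snd) b.2), (p.length : Int) + 1 + 1, b.2,
           1 + gtCount (s.map Prod.snd) b.2) := by
      by_cases hbe : b.2 = prevV
      · simp [rankStep, hbe]
        exact fun h => absurd h h7
      · simp [rankStep, hbe, hcount hbe, add_comm]
    rw [PySem.List.enumerate_cons, List.foldl_cons, hstep]
    have happ : s = (p ++ [b]) ++ t' := by rw [h1]; simp
    have hitems' : (acc.insert b.1 (1 + gtCount (s.map Prod.snd) b.2)).items
        = (p ++ [b]).map (fun kv => (kv.1, 1 + gtCount (s.map Prod.snd) kv.2)) := by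
      rw [PySem.Dict.items_insert_of_not_contains acc _ hkfresh, h4]
      simp
    have h5' : ∀ a ∈ p ++ [b], b.2 ≤ a.2 := by
      intro a ha
      rcases List.mem_append.mp ha with ha' | ha'
      · exact le_trans hvb (h5 a ha')
      · simp at ha'
        subst ha'
        exact le_refl _
    have := ih (p ++ [b]) (acc.insert b.1 (1 + gtCount (s.map Prod.snd) b.2)) b.2
      happ hitems' h5' ht' (by simp)
    simpa [add_assoc] using this

-- a Dict built from an assoc list with distinct keys has exactly that items list
theorem items_ofList_of_nodup (s : List (String × Int)) (h : (s.map Prod.fst).Nodup) :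
    (PySem.Dict.ofList s).items = s := by
  have h0 : ∀ a ∈ s, (PySem.Dict.empty : PySem.Dict String Int).contains a.1 = false := by
    intro a _; simp [pysem]
  have := PySem.Dict.items_foldl_insert_fresh s (fun kv => kv.1) (fun kv => kv.2)
      PySem.Dict.empty h0 (by simpa using h)
  simpa [PySem.Dict.ofList] using this

theorem rank_dict_items_spec : Claim_equal_rank_dict_items := by
  intro input _ hpre
  unfold Spec_rank_dict_items rank_dict_items rank_dict_items_alt
  set s := PySem.List.sorted input (fun item => item.2) true with hs
  have hperm : s.Perm input := PySem.List.sorted_perm input (fun item => item.2) true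
  have hkeys : (s.map Prod.fst).Nodup := ((hperm.map Prod.fst).nodup_iff).mpr hpre
  have hsorted : s.Pairwise (fun a b => b.2 ≤ a.2) :=
    PySem.List.sorted_pairwise_rev input (fun item => item.2)
  have hitems : (PySem.Dict.ofList s).items = s := items_ofList_of_nodup s hkeys
  have hvals : (PySem.Dict.ofList s).values = s.map Prod.snd := by
    simp only [PySem.Dict.values, hitems]
  -- B's rank dict
  have hB : (s.foldl (fun d kv => d.insert kv.1 (1 + gtCount (s.map Prod.snd) kv.2))
        (PySem.Dict.empty : PySem.Dict String Int)).items
      = s.map (fun kv => (kv.1, 1 + gtCount (s.map Prod.snd) kv.2)) := by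
    have h0 : ∀ a ∈ s, (PySem.Dict.empty : PySem.Dict String Int).contains a.1 = false := by
      intro a _; simp [pysem]
    simpa using PySem.Dict.items_foldl_insert_fresh s (fun kv => kv.1)
      (fun kv => 1 + gtCount (s.map Prod.snd) kv.2) PySem.Dict.empty h0 (by simpa using hkeys)
  -- A's rank dict
  have hA : ((PySem.List.enumerate s 0).foldl rankStep
        ((PySem.Dict.empty : PySem.Dict String Int), 1, 0, 0)).1.items
      = s.map (fun kv => (kv.1, 1 + gtCount (s.map Prod.snd) kv.2)) := by
    match hsd : s with
    | [] => simp [PySem.List.enumerate, PySem.Dict.empty]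
    | hd :: t =>
      rw [PySem.List.enumerate_cons, List.foldl_cons]
      have hmax : ∀ b ∈ t, b.2 ≤ hd.2 := by
        intro b hb; exact (List.pairwise_cons.mp (hsd ▸ hsorted)).1 b hb
      have hg0 : gtCount (hd.2 :: List.map Prod.snd t) hd.2 = 0 := by
        rw [gtCount_eq_countP]
        have : List.countP (fun w => decide (hd.2 < w)) (hd.2 :: List.map Prod.snd t) = 0 := by
          rw [List.countP_eq_zero]
          intro w hw
          simp only [List.mem_cons, List.mem_map] at hw
          rcases hw with rfl | ⟨⟨a, b⟩, hb, rfl⟩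
          · simp
          · simpa using not_lt.mpr (hmax (a, b) hb)
        simp [this]
      have hstep : rankStep ((PySem.Dict.empty : PySem.Dict String Int), 1, 0, 0) (0, hd)
          = (PySem.Dict.empty.insert hd.1 1, 2, hd.2, 1) := by
        simp [rankStep]
      rw [hstep]
      have := rank_loop_inv (hd :: t) (hsd ▸ hsorted) (hsd ▸ hkeys) t [hd]
        (PySem.Dict.empty.insert hd.1 1) hd.2 rfl
        (by simp [PySem.Dict.items_insert_of_not_contains, pysem, PySem.Dict.empty, hg0])
        (by intro a ha; simp at ha; simp [ha])
        hmax (by simp)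
      simpa [hg0] using this
  simp only [hitems, hvals]
  exact Prod.ext (hA.trans hB.symm) rfl
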